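-- pv_equiv track=rewrite | github.com/alelouis/advent-of-code | 2020/day-18/main.py | find_braces
-- ===== SOURCE A (Python) =====
-- def find_braces(string):
--     co, indexes, braces = 0, [], []
--     for c in string:
--         if c == '(': co += 1
--         if c == ')': co -= 1
--         indexes.append(co)
--     indexes.insert(0, 0)
--     for e, ij in enumerate(zip(indexes, indexes[1:])):
--         if [ij[0], ij[1]] == [0, 1] or [ij[0], ij[1]] == [1, 0]: braces.append(e)
--     return braces
-- ===== SOURCE B (Python) =====
-- def find_braces(string):
--     co, braces = 0, []
--     for i, c in enumerate(string):
--         if c == '(':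
--             if co == 0:
--                 braces.append(i)
--             co += 1
--         elif c == ')':
--             if co == 1:
--                 braces.append(i)
--             co -= 1
--     return braces
-- ===== Notes on version B (the rewrite author's own statement) =====
-- stated objective: simpler
-- what changed: Single linear pass maintaining only the running depth and recording exact 0->1 and 1->0 crossings, instead of materialising the full depth array and scanning its consecutive pairs in a second pass.
import Mathlib
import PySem

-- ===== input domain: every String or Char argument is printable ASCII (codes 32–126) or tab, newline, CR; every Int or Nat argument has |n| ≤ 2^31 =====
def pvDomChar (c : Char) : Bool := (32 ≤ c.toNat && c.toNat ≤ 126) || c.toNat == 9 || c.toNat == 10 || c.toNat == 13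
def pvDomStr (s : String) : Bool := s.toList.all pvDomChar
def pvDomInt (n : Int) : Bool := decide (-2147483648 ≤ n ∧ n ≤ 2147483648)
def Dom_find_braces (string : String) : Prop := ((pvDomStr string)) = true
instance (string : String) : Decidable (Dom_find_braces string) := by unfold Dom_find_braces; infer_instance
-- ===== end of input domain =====

-- ===== PORT A =====
-- B: one linear pass tracking the running depth and recording 0->1 / 1->0 crossings;
-- A builds the full depth list and scans consecutive pairs. Same return value, proved equal.
def pvStep (co : Int) (c : Char) : Int :=
  let co1 := if c = '(' then co + 1 else co
  if c = ')' then co1 - 1 else co1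

-- A's first loop: the running-depth list 'indexes'
def pvIndexes (co : Int) : List Char → List Int
  | [] => []
  | c :: cs => pvStep co c :: pvIndexes (pvStep co c) cs

-- A's second loop over zip(indexes, indexes[1:]) with enumerate counter e
def pvBraces (e : Int) : List Int → List Int
  | x :: y :: rest =>
    if (x = 0 ∧ y = 1) ∨ (x = 1 ∧ y = 0) then e :: pvBraces (e + 1) (y :: rest)
    else pvBraces (e + 1) (y :: rest)
  | _ => []

def find_braces (string : String) : List Int :=
  pvBraces 0 (0 :: pvIndexes 0 string.toList)

-- ===== PORT B =====
def pvScan (co i : Int) : List Char → List Int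
  | [] => []
  | c :: cs =>
    if c = '(' then
      if co = 0 then i :: pvScan (co + 1) (i + 1) cs else pvScan (co + 1) (i + 1) cs
    else if c = ')' then
      if co = 1 then i :: pvScan (co - 1) (i + 1) cs else pvScan (co - 1) (i + 1) cs
    else pvScan co (i + 1) cs

def find_braces_alt (string : String) : List Int := pvScan 0 0 string.toList

-- ===== PRECONDITION & SPEC =====
def Spec_find_braces (string : String) (out : List Int) : Prop := out = find_braces_alt string
instance (string : String) (out : List Int) : Decidable (Spec_find_braces string out) := by unfold Spec_find_braces; infer_instance

-- ===== CLAIM (what is proved, stated in full; the proofs are below) =====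
def Claim_equal_find_braces : Prop := ∀ (string : String), Dom_find_braces string → Spec_find_braces string (find_braces string)

-- ===== LEMMAS AND PROOFS =====

-- ===== VERDICT (by name: the statement is the Claim_ definition above) =====
theorem pv_key : ∀ (cs : List Char) (co i : Int),
    pvBraces i (co :: pvIndexes co cs) = pvScan co i cs := by
  intro cs
  induction cs with
  | nil => intro co i; simp [pvIndexes, pvBraces, pvScan]
  | cons c rest ih =>
    intro co i
    by_cases h1 : c = '('
    · simp only [pvIndexes, pvBraces, pvScan, pvStep, h1, if_pos, ih]
      have hne : ¬ ('(' = ')') := by decide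
      simp only [if_neg hne]
      by_cases h0 : co = 0
      · subst h0; norm_num
      · have : ¬ ((co = 0 ∧ co + 1 = 1) ∨ (co = 1 ∧ co + 1 = 0)) := by omega
        simp only [if_neg this, if_neg h0]
    · by_cases h2 : c = ')'
      · simp only [pvIndexes, pvBraces, pvScan, pvStep, h2, ih]
        have hne : ¬ (')' = '(') := by decide
        simp only [if_neg hne, if_true]
        by_cases h0 : co = 1
        · subst h0; norm_num
        · have : ¬ ((co = 0 ∧ co - 1 = 1) ∨ (co = 1 ∧ co - 1 = 0)) := by omega
          simp only [if_neg this, if_neg h0]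
      · simp only [pvIndexes, pvBraces, pvScan, pvStep, if_neg h1, if_neg h2, ih]
        have : ¬ ((co = 0 ∧ co = 1) ∨ (co = 1 ∧ co = 0)) := by omega
        simp only [if_neg this]

-- ===== VERDICT =====
theorem find_braces_spec : Claim_equal_find_braces := by
  intro s _
  unfold Spec_find_braces find_braces find_braces_alt
  exact pv_key s.toList 0 0
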